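-- pv_equiv track=rewrite | github.com/dianaagl/kumir1 | Addons/convertor/src/translator_service/c_plus_plus.py | __line_rank
-- ===== SOURCE A (Python) =====
-- def __line_rank(s):
--     start = 0
--     end = 0
--     in_lit = False
--     in_char = False
--     in_comment = False
--     in_small_comment = False
--     processing_start = True
--     p = None
--     for c in s:
--         if in_lit:
--             if not p is None and p!="\\" and c=="\"":
--                 in_lit = False
--         elif in_char:
--             if not p is None and p!="\\" and c=="'":
--                 in_char = False
--         elif in_comment:
--             if not p is None and p=="*" and c=="/":
--                 in_comment = False
--         elif in_small_comment:
--             if c=="\n":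
--                 in_small_comment = False
--         else:
--             if c=="\"":
--                 in_lit = True
--             elif c=="'":
--                 in_char = True
--             elif c=="*" and p=="/":
--                 in_comment = True
--             elif c=="{":
--                 processing_start = False
--                 end += 1
--             elif c=="}":
--                 if processing_start:
--                     start -= 1
--                 else:
--                     end -= 1
--             elif not p is None and p=="/" and c=="/":
--                 in_small_comment = True
--         p = c
--     return start, end
-- ===== SOURCE B (Python) =====
-- def __line_rank(s):
--     # Jump-scanner: skip over string/char literals and comments in chunks,
--     # collecting only the braces seen in active code; then compute the
--     # result in closed form from the brace sequence.
--     n = len(s)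
--     braces = []
--     i = 0
--     while i < n:
--         c = s[i]
--         if c == '"' or c == "'":
--             i += 1
--             while i < n and not (s[i] == c and s[i - 1] != "\\"):
--                 i += 1
--             i += 1  # past the closing quote (or off the end)
--         elif c == '/' and i + 1 < n and s[i + 1] == '*':
--             i += 2
--             while i < n and not (s[i] == '/' and s[i - 1] == '*'):
--                 i += 1
--             # leave i at the closing '/', rescanned as a fresh code '/'
--         elif c == '/' and i + 1 < n and s[i + 1] == '/':
--             i += 2
--             while i < n and s[i] != '\n':
--                 i += 1
--             i += 1  # past the newline
--         else:
--             if c == '{' or c == '}':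
--                 braces.append(c)
--             i += 1
--     k = braces.index('{') if '{' in braces else len(braces)
--     pre, suf = braces[:k], braces[k:]
--     return -pre.count('}'), braces.count('{') - suf.count('}')
-- ===== Notes on version B (the rewrite author's own statement) =====
-- stated objective: alternative
-- what changed: A runs one eight-variable boolean-flag state machine over every character, counting braces inline; B is a jump scanner that skips string/char literals and comments in whole chunks via dedicated inner skip loops, collects only the active-code braces into a list, and then computes the pair in closed form (split at the first '{' and count) instead of folding a processing_start flag.
import Mathlib
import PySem

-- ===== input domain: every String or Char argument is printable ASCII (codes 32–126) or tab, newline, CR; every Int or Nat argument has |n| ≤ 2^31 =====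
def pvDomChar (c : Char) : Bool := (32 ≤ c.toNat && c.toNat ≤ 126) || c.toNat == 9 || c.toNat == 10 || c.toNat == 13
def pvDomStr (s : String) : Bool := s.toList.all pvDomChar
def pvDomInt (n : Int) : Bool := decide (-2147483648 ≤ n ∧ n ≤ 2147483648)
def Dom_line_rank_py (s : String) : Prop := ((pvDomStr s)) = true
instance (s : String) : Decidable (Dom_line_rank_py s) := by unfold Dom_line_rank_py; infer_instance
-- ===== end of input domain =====

-- B replaces A's single eight-variable state-machine fold by a jump scanner that skips
-- literals/comments in chunks collecting only the active-code braces, then computes the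
-- pair in closed form from that brace list (objective: alternative decomposition).

-- ===== PORT A =====
-- A's loop state: (start, end, in_lit, in_char, in_comment, in_small_comment, processing_start, p)
structure StA where
  st : Int
  en : Int
  lit : Bool
  chr : Bool
  cmt : Bool
  sml : Bool
  ps : Bool
  p : Option Char
deriving Repr, DecidableEq

def stepA (a : StA) (c : Char) : StA :=
  let a' :=
    if a.lit then
      if a.p ≠ none ∧ a.p ≠ some '\\' ∧ c = '"' then { a with lit := false } else a
    else if a.chr then
      if a.p ≠ none ∧ a.p ≠ some '\\' ∧ c = '\'' then { a with chr := false } else a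
    else if a.cmt then
      if a.p ≠ none ∧ a.p = some '*' ∧ c = '/' then { a with cmt := false } else a
    else if a.sml then
      if c = '\n' then { a with sml := false } else a
    else
      if c = '"' then { a with lit := true }
      else if c = '\'' then { a with chr := true }
      else if c = '*' ∧ a.p = some '/' then { a with cmt := true }
      else if c = '{' then { a with ps := false, en := a.en + 1 }
      else if c = '}' then
        if a.ps then { a with st := a.st - 1 } else { a with en := a.en - 1 }
      else if a.p ≠ none ∧ a.p = some '/' ∧ c = '/' then { a with sml := true }
      else a
  { a' with p := some c }

def line_rank_py (s : String) : Int × Int :=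
  let f := s.toList.foldl stepA ⟨0, 0, false, false, false, false, true, none⟩
  (f.st, f.en)

-- ===== PORT B =====
-- inner while of Source B for a string/char literal: prev is the previous character;
-- returns the suffix after the closing quote
def skipLit (q : Char) (prev : Char) : List Char → List Char
  | [] => []
  | c :: rest => if c = q ∧ prev ≠ '\\' then rest else skipLit q c rest

-- inner while for a block comment; returns the suffix STARTING AT the closing '/'
def skipBlk (prev : Char) : List Char → List Char
  | [] => []
  | c :: rest => if c = '/' ∧ prev = '*' then c :: rest else skipBlk c rest

-- inner while for a line comment; returns the suffix after the newline
def skipLine : List Char → List Char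
  | [] => []
  | c :: rest => if c = '\n' then rest else skipLine rest

theorem skipLit_len (q : Char) : ∀ (l : List Char) (prev : Char), (skipLit q prev l).length ≤ l.length := by
  intro l; induction l with
  | nil => intro prev; simp [skipLit]
  | cons c rest ih =>
      intro prev; simp only [skipLit]; split
      · simp
      · exact Nat.le_trans (ih c) (Nat.le_succ _)

theorem skipBlk_len : ∀ (l : List Char) (prev : Char), (skipBlk prev l).length ≤ l.length := by
  intro l; induction l with
  | nil => intro prev; simp [skipBlk]
  | cons c rest ih =>
      intro prev; simp only [skipBlk]; split
      · simp
      · exact Nat.le_trans (ih c) (Nat.le_succ _)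

theorem skipLine_len : ∀ (l : List Char), (skipLine l).length ≤ l.length := by
  intro l; induction l with
  | nil => simp [skipLine]
  | cons c rest ih =>
      simp only [skipLine]; split
      · simp
      · exact Nat.le_trans ih (Nat.le_succ _)

-- Source B's outer while loop: collect the braces seen in active code
def scanB : List Char → List Char
  | [] => []
  | c :: rest =>
    if c = '"' then scanB (skipLit '"' '"' rest)
    else if c = '\'' then scanB (skipLit '\'' '\'' rest)
    else if c = '/' then
      match rest with
      | '*' :: r2 => scanB (skipBlk '*' r2)
      | '/' :: r2 => scanB (skipLine r2)
      | [] => []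
      | d :: r2 => scanB (d :: r2)
    else if c = '{' ∨ c = '}' then c :: scanB rest
    else scanB rest
termination_by l => l.length
decreasing_by
  all_goals simp only [List.length_cons, Nat.lt_succ_iff]
  · exact skipLit_len '"' rest '"'
  · exact skipLit_len '\'' rest '\''
  · exact Nat.le_trans (skipBlk_len r2 '*') (Nat.le_succ _)
  · exact Nat.le_trans (skipLine_len r2) (Nat.le_succ _)
  · omega
  all_goals omega

def line_rank_py_alt (s : String) : Int × Int :=
  let braces := scanB s.toList
  let pre := braces.takeWhile (· ≠ '{')
  let suf := braces.dropWhile (· ≠ '{')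
  (-(pre.count '}' : Int), (braces.count '{' : Int) - (suf.count '}' : Int))

-- ===== PRECONDITION & SPEC =====
def Spec_line_rank_py (s : String) (out : Int × Int) : Prop := out = line_rank_py_alt s
instance (s : String) (out : Int × Int) : Decidable (Spec_line_rank_py s out) := by unfold Spec_line_rank_py; infer_instance

-- ===== CLAIM (what is proved, stated in full; the proofs are below) =====
def Claim_equal_line_rank_py : Prop := ∀ (s : String), Dom_line_rank_py s → Spec_line_rank_py s (line_rank_py s)

-- ===== LEMMAS AND PROOFS =====

-- the brace-counting fold A performs, isolated
def countFold (st en : Int) (ps : Bool) : List Char → Int × Int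
  | [] => (st, en)
  | c :: rest =>
    if c = '{' then countFold st (en + 1) false rest
    else if c = '}' then
      if ps then countFold (st - 1) en ps rest else countFold st (en - 1) ps rest
    else countFold st en ps rest

def normSt (st en : Int) (ps : Bool) (p : Option Char) : StA := ⟨st, en, false, false, false, false, ps, p⟩

theorem cf_false : ∀ (bs : List Char) (st en : Int),
    countFold st en false bs = (st, en + (bs.count '{' : Int) - (bs.count '}' : Int)) := by
  intro bs; induction bs with
  | nil => intro st en; simp [countFold]
  | cons c rest ih =>
      intro st en
      by_cases h1 : c = '{'
      · subst h1; simp [countFold, ih, Prod.mk.injEq]; omega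
      · by_cases h2 : c = '}'
        · subst h2; simp [countFold, ih, Prod.mk.injEq]; omega
        · simp [countFold, ih, h1, h2]

theorem cf_true : ∀ (bs : List Char) (st en : Int),
    countFold st en true bs =
      (st - ((bs.takeWhile (· ≠ '{')).count '}' : Int),
       en + (bs.count '{' : Int) - ((bs.dropWhile (· ≠ '{')).count '}' : Int)) := by
  intro bs; induction bs with
  | nil => intro st en; simp [countFold]
  | cons c rest ih =>
      intro st en
      by_cases h1 : c = '{'
      · subst h1
        simp [countFold, cf_false, List.takeWhile, List.dropWhile, Prod.mk.injEq]
        omega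
      · by_cases h2 : c = '}'
        · subst h2
          simp [countFold, ih, List.takeWhile, List.dropWhile, Prod.mk.injEq]
          omega
        · simp [countFold, ih, List.takeWhile, List.dropWhile, h1, h2]

def projA (a : StA) : Int × Int := (a.st, a.en)

theorem lit_run : ∀ (l : List Char) (pc : Char) (st en : Int) (ps : Bool),
    projA (l.foldl stepA ⟨st, en, true, false, false, false, ps, some pc⟩) =
    projA ((skipLit '"' pc l).foldl stepA (normSt st en ps (some '"'))) := by
  intro l; induction l with
  | nil => intro pc st en ps; simp [skipLit, projA, normSt]
  | cons c rest ih =>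
      intro pc st en ps
      simp only [List.foldl_cons, skipLit, stepA]
      by_cases h1 : c = '"' <;> by_cases h2 : pc = '\\' <;>
        simp [h1, h2, normSt] <;> first
          | exact ih c st en ps
          | (subst h1; exact ih '"' st en ps)

theorem chr_run : ∀ (l : List Char) (pc : Char) (st en : Int) (ps : Bool),
    projA (l.foldl stepA ⟨st, en, false, true, false, false, ps, some pc⟩) =
    projA ((skipLit '\'' pc l).foldl stepA (normSt st en ps (some '\''))) := by
  intro l; induction l with
  | nil => intro pc st en ps; simp [skipLit, projA, normSt]
  | cons c rest ih =>
      intro pc st en ps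
      simp only [List.foldl_cons, skipLit, stepA]
      by_cases h1 : c = '\'' <;> by_cases h2 : pc = '\\' <;>
        simp [h1, h2, normSt] <;> first
          | exact ih c st en ps
          | (subst h1; exact ih '\'' st en ps)

theorem blk_run : ∀ (l : List Char) (pc : Char) (st en : Int) (ps : Bool),
    projA (l.foldl stepA ⟨st, en, false, false, true, false, ps, some pc⟩) =
    projA ((skipBlk pc l).foldl stepA (normSt st en ps (some '*'))) := by
  intro l; induction l with
  | nil => intro pc st en ps; simp [skipBlk, projA, normSt]
  | cons c rest ih =>
      intro pc st en ps
      simp only [List.foldl_cons, skipBlk]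
      by_cases h1 : c = '/' <;> by_cases h2 : pc = '*' <;>
        simp [stepA, h1, h2, normSt] <;> first
          | exact ih c st en ps
          | exact ih '/' st en ps

theorem line_run : ∀ (l : List Char) (pc : Char) (st en : Int) (ps : Bool),
    projA (l.foldl stepA ⟨st, en, false, false, false, true, ps, some pc⟩) =
    projA ((skipLine l).foldl stepA (normSt st en ps (some '\n'))) := by
  intro l; induction l with
  | nil => intro pc st en ps; simp [skipLine, projA, normSt]
  | cons c rest ih =>
      intro pc st en ps
      simp only [List.foldl_cons, skipLine, stepA]
      by_cases h1 : c = '\n' <;>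
        simp [h1, normSt] <;> exact ih c st en ps

def pOK (p : Option Char) : Prop := p ≠ some '/'

theorem scanB_quote (rest : List Char) : scanB ('"' :: rest) = scanB (skipLit '"' '"' rest) := by
  rw [scanB.eq_def]; simp

theorem scanB_squote (rest : List Char) : scanB ('\'' :: rest) = scanB (skipLit '\'' '\'' rest) := by
  rw [scanB.eq_def]; simp

theorem scanB_blk (r2 : List Char) : scanB ('/' :: '*' :: r2) = scanB (skipBlk '*' r2) := by
  rw [scanB.eq_def]; simp

theorem scanB_line (r2 : List Char) : scanB ('/' :: '/' :: r2) = scanB (skipLine r2) := by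
  rw [scanB.eq_def]; simp

theorem scanB_slash_nil : scanB ['/'] = [] := by
  rw [scanB.eq_def]; simp

theorem scanB_slash_other (d : Char) (r2 : List Char) (h1 : d ≠ '*') (h2 : d ≠ '/') :
    scanB ('/' :: d :: r2) = scanB (d :: r2) := by
  rw [scanB.eq_def]
  simp only [reduceIte]
  split <;> simp_all

theorem scanB_open (rest : List Char) : scanB ('{' :: rest) = '{' :: scanB rest := by
  rw [scanB.eq_def]; simp

theorem scanB_close (rest : List Char) : scanB ('}' :: rest) = '}' :: scanB rest := by
  rw [scanB.eq_def]; simp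

theorem scanB_other (c : Char) (rest : List Char)
    (h1 : c ≠ '"') (h2 : c ≠ '\'') (h3 : c ≠ '/') (h4 : c ≠ '{') (h5 : c ≠ '}') :
    scanB (c :: rest) = scanB rest := by
  rw [scanB.eq_def]
  simp [h1, h2, h3, h4, h5]

theorem mainA : ∀ (n : Nat) (l : List Char), l.length ≤ n →
    ∀ (st en : Int) (ps : Bool) (p : Option Char), pOK p →
    projA (l.foldl stepA (normSt st en ps p)) = countFold st en ps (scanB l) := by
  intro n
  induction n with
  | zero =>
      intro l hl st en ps p hp
      have h0 : l = [] := List.eq_nil_of_length_eq_zero (Nat.le_zero.mp hl)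
      subst h0; simp [scanB, countFold, projA, normSt]
  | succ n ih =>
      intro l hl st en ps p hp
      unfold pOK at hp
      match l, hl with
      | [], _ => simp [scanB, countFold, projA, normSt]
      | c :: rest, hl =>
        have hr : rest.length ≤ n := by simpa using hl
        simp only [List.foldl_cons]
        by_cases h1 : c = '"'
        · subst h1
          have hst : stepA (normSt st en ps p) '"' =
              ⟨st, en, true, false, false, false, ps, some '"'⟩ := by
            simp [stepA, normSt]
          rw [hst, scanB_quote, lit_run rest '"' st en ps]
          exact ih (skipLit '"' '"' rest) (Nat.le_trans (skipLit_len '"' rest '"') hr)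
            st en ps (some '"') (by simp [pOK])
        · by_cases h2 : c = '\''
          · subst h2
            have hst : stepA (normSt st en ps p) '\'' =
                ⟨st, en, false, true, false, false, ps, some '\''⟩ := by
              simp [stepA, normSt]
            rw [hst, scanB_squote, chr_run rest '\'' st en ps]
            exact ih (skipLit '\'' '\'' rest) (Nat.le_trans (skipLit_len '\'' rest '\'') hr)
              st en ps (some '\'') (by simp [pOK])
          · by_cases h3 : c = '/'
            · subst h3
              have hst : stepA (normSt st en ps p) '/' = normSt st en ps (some '/') := by
                simp [stepA, normSt, hp]
              rw [hst]
              match rest, hr with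
              | [], _ => simp [scanB_slash_nil, countFold, projA, normSt]
              | d :: r2, hr =>
                have hr2 : r2.length ≤ n := Nat.le_of_succ_le (by simpa using hr)
                simp only [List.foldl_cons]
                by_cases hd1 : d = '*'
                · subst hd1
                  have hst2 : stepA (normSt st en ps (some '/')) '*' =
                      ⟨st, en, false, false, true, false, ps, some '*'⟩ := by
                    simp [stepA, normSt]
                  rw [hst2, scanB_blk, blk_run r2 '*' st en ps]
                  exact ih (skipBlk '*' r2) (Nat.le_trans (skipBlk_len r2 '*') hr2)
                    st en ps (some '*') (by simp [pOK])
                · by_cases hd2 : d = '/'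
                  · subst hd2
                    have hst2 : stepA (normSt st en ps (some '/')) '/' =
                        ⟨st, en, false, false, false, true, ps, some '/'⟩ := by
                      simp [stepA, normSt]
                    rw [hst2, scanB_line, line_run r2 '/' st en ps]
                    exact ih (skipLine r2) (Nat.le_trans (skipLine_len r2) hr2)
                      st en ps (some '\n') (by simp [pOK])
                  · -- d is an ordinary character: the pending '/' is irrelevant
                    have hst2 : stepA (normSt st en ps (some '/')) d =
                        stepA (normSt st en ps (some '\n')) d := by
                      simp [stepA, normSt, hd1, hd2]
                      split_ifs <;> simp_all
                    rw [hst2, scanB_slash_other d r2 hd1 hd2]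
                    have := ih (d :: r2) hr st en ps (some '\n') (by simp [pOK])
                    simpa [List.foldl_cons] using this
            · by_cases h4 : c = '{'
              · subst h4
                have hst : stepA (normSt st en ps p) '{' =
                    normSt st (en + 1) false (some '{') := by
                  simp [stepA, normSt, hp]
                rw [hst, scanB_open]
                have : countFold st en ps ('{' :: scanB rest) =
                    countFold st (en + 1) false (scanB rest) := by simp [countFold]
                rw [this]
                exact ih rest hr st (en + 1) false (some '{') (by simp [pOK])
              · by_cases h5 : c = '}'
                · subst h5
                  by_cases hps : ps = true
                  · subst hps
                    have hst : stepA (normSt st en true p) '}' =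
                        normSt (st - 1) en true (some '}') := by
                      simp [stepA, normSt, hp]
                    rw [hst, scanB_close]
                    have : countFold st en true ('}' :: scanB rest) =
                        countFold (st - 1) en true (scanB rest) := by simp [countFold]
                    rw [this]
                    exact ih rest hr (st - 1) en true (some '}') (by simp [pOK])
                  · have hps' : ps = false := by simpa using hps
                    subst hps'
                    have hst : stepA (normSt st en false p) '}' =
                        normSt st (en - 1) false (some '}') := by
                      simp [stepA, normSt, hp]
                    rw [hst, scanB_close]
                    have : countFold st en false ('}' :: scanB rest) =
                        countFold st (en - 1) false (scanB rest) := by simp [countFold]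
                    rw [this]
                    exact ih rest hr st (en - 1) false (some '}') (by simp [pOK])
                · have hst : stepA (normSt st en ps p) c = normSt st en ps (some c) := by
                    simp [stepA, normSt, hp, h1, h2, h3, h4, h5]
                  rw [hst, scanB_other c rest h1 h2 h3 h4 h5]
                  exact ih rest hr st en ps (some c) (by simp [pOK, h3])
-- ===== VERDICT (by name: the statement is the Claim_ definition above) =====
theorem line_rank_py_spec : Claim_equal_line_rank_py := by
  intro s _
  unfold Spec_line_rank_py line_rank_py line_rank_py_alt
  have h := mainA s.toList.length s.toList le_rfl 0 0 true none (by simp [pOK])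
  rw [cf_true] at h
  simp only [projA, normSt, Prod.mk.injEq] at h
  obtain ⟨h1, h2⟩ := h
  simp only [Prod.mk.injEq]
  constructor
  · rw [h1]; ring
  · rw [h2]; ring
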